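-- pv_equiv track=rewrite | github.com/jier/docsible | docsible/analyzers/complexity_analyzer/integrations/providers.py | _detect_container_platform
-- ===== SOURCE A (Python) =====
-- def _detect_container_platform(modules: list[str]) -> str:
--     """Detect specific container platform from modules."""
--     if any("kubernetes" in m or "k8s" in m for m in modules):
--         return "Kubernetes"
--     elif any("docker" in m for m in modules):
--         return "Docker"
--     elif any("podman" in m for m in modules):
--         return "Podman"
--     else:
--         return "Container Platform"
-- ===== SOURCE B (Python) =====
-- def _detect_container_platform(modules: list[str]) -> str:
--     """Detect specific container platform from modules (single pass, best-rank)."""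
--     best = 4  # 2=Docker, 3=Podman, 4=nothing seen
--     for m in modules:
--         if "kubernetes" in m or "k8s" in m:
--             return "Kubernetes"  # top priority: nothing can beat it
--         if "docker" in m:
--             best = min(best, 2)
--         elif "podman" in m:
--             best = min(best, 3)
--     if best == 2:
--         return "Docker"
--     if best == 3:
--         return "Podman"
--     return "Container Platform"
-- ===== Notes on version B (the rewrite author's own statement) =====
-- stated objective: alternative
-- what changed: Replaces A's three separate any()-scans of the list by a single pass that keeps the best (highest-priority) platform rank seen, returning Kubernetes immediately on sight.
import Mathlib
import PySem

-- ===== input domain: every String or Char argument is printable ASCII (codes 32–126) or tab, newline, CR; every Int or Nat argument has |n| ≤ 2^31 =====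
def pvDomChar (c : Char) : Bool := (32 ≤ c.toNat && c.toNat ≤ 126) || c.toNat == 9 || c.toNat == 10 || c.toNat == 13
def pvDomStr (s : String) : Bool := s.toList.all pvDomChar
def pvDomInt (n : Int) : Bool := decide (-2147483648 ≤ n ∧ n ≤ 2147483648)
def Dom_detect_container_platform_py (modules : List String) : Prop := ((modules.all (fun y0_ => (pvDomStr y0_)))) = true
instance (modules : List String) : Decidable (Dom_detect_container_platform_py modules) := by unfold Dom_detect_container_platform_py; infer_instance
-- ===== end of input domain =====

-- B replaces A's three any()-scans by a single pass that keeps the best platform rank seen (same cost class).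


-- ===== PORT A =====
def detect_container_platform_py (modules : List String) : String :=
  if modules.any (fun m => PySem.Str.isIn "kubernetes" m || PySem.Str.isIn "k8s" m) then "Kubernetes"
  else if modules.any (fun m => PySem.Str.isIn "docker" m) then "Docker"
  else if modules.any (fun m => PySem.Str.isIn "podman" m) then "Podman"
  else "Container Platform"

-- ===== PORT B =====
-- single pass keeping the best (lowest) platform rank; 2=Docker, 3=Podman, 4=none; Kubernetes returns at once
def pvAltLoop (ms : List String) (best : Nat) : String :=
  match ms with
  | [] => if best == 2 then "Docker" else if best == 3 then "Podman" else "Container Platform"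
  | m :: rest =>
    if PySem.Str.isIn "kubernetes" m || PySem.Str.isIn "k8s" m then "Kubernetes"
    else if PySem.Str.isIn "docker" m then pvAltLoop rest (min best 2)
    else if PySem.Str.isIn "podman" m then pvAltLoop rest (min best 3)
    else pvAltLoop rest best

def detect_container_platform_py_alt (modules : List String) : String :=
  pvAltLoop modules 4

-- ===== PRECONDITION & SPEC =====
def Spec_detect_container_platform_py (modules : List String) (out : String) : Prop := out = detect_container_platform_py_alt modules
instance (modules : List String) (out : String) : Decidable (Spec_detect_container_platform_py modules out) := by unfold Spec_detect_container_platform_py; infer_instance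

-- ===== CLAIM (what is proved, stated in full; the proofs are below) =====
def Claim_equal_detect_container_platform_py : Prop := ∀ (modules : List String), Dom_detect_container_platform_py modules → Spec_detect_container_platform_py modules (detect_container_platform_py modules)

-- ===== LEMMAS AND PROOFS =====
-- Characterisation of B's loop for any intermediate best rank in {2,3,4}.
theorem pvAltLoop_char (ms : List String) (best : Nat) (h2 : 2 ≤ best) (h4 : best ≤ 4) :
    pvAltLoop ms best =
      if ms.any (fun m => PySem.Str.isIn "kubernetes" m || PySem.Str.isIn "k8s" m) then "Kubernetes"
      else if best = 2 ∨ ms.any (fun m => PySem.Str.isIn "docker" m) then "Docker"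
      else if best = 3 ∨ ms.any (fun m => PySem.Str.isIn "podman" m) then "Podman"
      else "Container Platform" := by
  induction ms generalizing best with
  | nil => interval_cases best <;> simp [pvAltLoop]
  | cons m rest ih =>
    by_cases hk : (PySem.Str.isIn "kubernetes" m || PySem.Str.isIn "k8s" m) = true
    · simp only [Bool.or_eq_true] at hk
      simp at hk
      rcases hk with hk | hk <;> simp [pvAltLoop, hk]
    · simp only [Bool.or_eq_true, not_or] at hk
      simp at hk
      by_cases hd : PySem.Str.isIn "docker" m = true
      · simp at hd
        have hstep : pvAltLoop (m :: rest) best = pvAltLoop rest (min best 2) := by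
          simp [pvAltLoop, hk, hd]
        rw [hstep, ih _ (by omega) (by omega), show min best 2 = 2 by omega]
        simp [hk, hd]
      · simp at hd
        by_cases hp : PySem.Str.isIn "podman" m = true
        · simp at hp
          have hstep : pvAltLoop (m :: rest) best = pvAltLoop rest (min best 3) := by
            simp [pvAltLoop, hk, hd, hp]
          rw [hstep, ih _ (by omega) (by omega)]
          rcases (by omega : best = 2 ∨ best = 3 ∨ best = 4) with h | h | h <;>
            subst h <;> simp [hk, hd, hp]
        · simp at hp
          have hstep : pvAltLoop (m :: rest) best = pvAltLoop rest best := by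
            simp [pvAltLoop, hk, hd, hp]
          rw [hstep, ih _ h2 h4]
          simp [hk, hd, hp]

-- ===== VERDICT (by name: the statement is the Claim_ definition above) =====
theorem detect_container_platform_py_spec : Claim_equal_detect_container_platform_py := by
  intro modules _
  unfold Spec_detect_container_platform_py detect_container_platform_py detect_container_platform_py_alt
  rw [pvAltLoop_char modules 4 (by omega) (by omega)]
  simp
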